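-- pv_equiv track=rewrite | github.com/theorem46/Yang-Mills-Mass-Gap | 1-Core Validation/exp_core_validation_30_solved_state_decomposition_existence_v2.py | generate_G11
-- ===== SOURCE A (Python) =====
-- def generate_G11(N):
--     x = [1] * N
--     for i in range(1, N):
--         if i % 2 == 0:
--             x[i] = (x[i - 1] + 1) % 3
--         else:
--             x[i] = (x[i - 1] * 2) % 3
--     return x
-- ===== SOURCE B (Python) =====
-- def generate_G11(N):
--     table = (1, 2, 0, 0)
--     return [table[i % 4] for i in range(N)]
-- ===== Notes on version B (the rewrite author's own statement) =====
-- stated objective: simpler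
-- what changed: Replaces the carried mod-three recurrence with a stateless per-index lookup into the fixed period-four table, computing each element directly from its index.
import Mathlib
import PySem

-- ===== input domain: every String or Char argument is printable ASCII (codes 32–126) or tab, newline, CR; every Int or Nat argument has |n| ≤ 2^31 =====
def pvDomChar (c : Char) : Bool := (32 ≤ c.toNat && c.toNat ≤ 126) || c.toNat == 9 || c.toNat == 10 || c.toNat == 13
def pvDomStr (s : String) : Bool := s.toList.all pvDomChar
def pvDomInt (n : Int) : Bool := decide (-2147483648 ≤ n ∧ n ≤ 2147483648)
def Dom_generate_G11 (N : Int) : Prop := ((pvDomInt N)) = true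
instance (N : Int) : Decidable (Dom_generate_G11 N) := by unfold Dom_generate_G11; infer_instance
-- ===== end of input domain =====

-- B computes each element directly from its index via the fixed period-four lookup table; A iterates the mod-three recurrence. Same cost; simpler, stateless.

-- ===== PORT A =====
-- literal transliteration: x = [1]*N; for i in range(1, N): update x[i] from x[i-1]
def generate_G11 (N : Int) : List Int :=
  (PySem.List.pyRange 1 N 1).foldl
    (fun x i =>
      if PySem.Int.mod i 2 = 0 then
        x.set i.toNat (PySem.Int.mod (PySem.List.pyGetD x (i - 1) 0 + 1) 3)
      else
        x.set i.toNat (PySem.Int.mod (PySem.List.pyGetD x (i - 1) 0 * 2) 3))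
    (List.replicate N.toNat 1)

-- ===== PORT B =====
-- literal transliteration of Source B: [table[i % 4] for i in range(N)]
def generate_G11_alt (N : Int) : List Int :=
  (PySem.List.pyRange 0 N 1).map
    (fun i => PySem.List.pyGetD [1, 2, 0, 0] (PySem.Int.mod i 4) 0)

-- ===== PRECONDITION & SPEC =====
def Spec_generate_G11 (N : Int) (out : List Int) : Prop := out = generate_G11_alt N
instance (N : Int) (out : List Int) : Decidable (Spec_generate_G11 N out) := by unfold Spec_generate_G11; infer_instance

-- ===== CLAIM (what is proved, stated in full; the proofs are below) =====
def Claim_equal_generate_G11 : Prop := ∀ (N : Int), Dom_generate_G11 N → Spec_generate_G11 N (generate_G11 N)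

-- ===== LEMMAS AND PROOFS =====

-- the closed-form element: table[n % 4]
def pvF (n : Nat) : Int := ([1, 2, 0, 0] : List Int).getD (n % 4) 0

-- A's loop body
def pvStep (x : List Int) (i : Int) : List Int :=
  if PySem.Int.mod i 2 = 0 then
    x.set i.toNat (PySem.Int.mod (PySem.List.pyGetD x (i - 1) 0 + 1) 3)
  else
    x.set i.toNat (PySem.Int.mod (PySem.List.pyGetD x (i - 1) 0 * 2) 3)

lemma pvF_step (k : Nat) (hk : 1 ≤ k) :
    (if k % 2 = 0 then PySem.Int.mod (pvF (k - 1) + 1) 3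
     else PySem.Int.mod (pvF (k - 1) * 2) 3) = pvF k := by
  have h4 : k % 4 = 0 ∨ k % 4 = 1 ∨ k % 4 = 2 ∨ k % 4 = 3 := by omega
  rcases h4 with h | h | h | h <;>
  · have h1 : (k - 1) % 4 = (k + 3) % 4 := by omega
    have h2 : k % 2 = k % 4 % 2 := by omega
    simp [pvF, h, h1, h2, Nat.add_mod]

lemma pvA_invariant (n : Nat) : ∀ k : Nat, 1 ≤ k → k ≤ n →
    (PySem.List.pyRange 1 (k : Int) 1).foldl pvStep (List.replicate n 1)
      = (List.range k).map pvF ++ List.replicate (n - k) 1 := by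
  intro k
  induction k with
  | zero => omega
  | succ k ih =>
    intro _ hkn
    by_cases hk1 : 1 ≤ k
    · have hcast : ((k + 1 : Nat) : Int) = (k : Int) + 1 := by push_cast; ring
      rw [hcast, PySem.List.pyRange_one_succ_right (by exact_mod_cast hk1),
          List.foldl_append, ih hk1 (by omega)]
      -- evaluate the last step at index k
      have hlen : ((List.range k).map pvF).length = k := by simp
      have hget : PySem.List.pyGetD
          ((List.range k).map pvF ++ List.replicate (n - k) 1) ((k : Int) - 1) 0
            = pvF (k - 1) := by
        have : ((k : Int) - 1) = ((k - 1 : Nat) : Int) := by omega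
        rw [this, PySem.List.pyGetD_natCast]
        rw [List.getD_eq_getElem?_getD, List.getElem?_append_left (by simp; omega)]
        simp [List.getElem?_map, List.getElem?_range (show k - 1 < k by omega), pvF]
      have hmod2 : PySem.Int.mod (k : Int) 2 = ((k % 2 : Nat) : Int) :=
        PySem.Int.mod_natCast k 2
      have hrep : List.replicate (n - k) (1 : Int)
          = 1 :: List.replicate (n - (k + 1)) 1 := by
        have : n - k = (n - (k + 1)) + 1 := by omega
        rw [this, List.replicate_succ]
      have hset : ∀ v : Int,
          (((List.range k).map pvF ++ List.replicate (n - k) 1).set k v)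
            = (List.range k).map pvF ++ v :: List.replicate (n - (k + 1)) 1 := by
        intro v
        rw [List.set_append_right _ _ (by omega), hrep]
        simp [hlen]
      have hstep : pvStep ((List.range k).map pvF ++ List.replicate (n - k) 1) (k : Int)
          = (List.range k).map pvF ++ pvF k :: List.replicate (n - (k + 1)) 1 := by
        unfold pvStep
        rw [hget, hmod2]
        have := pvF_step k hk1
        by_cases h2 : k % 2 = 0
        · rw [if_pos h2] at this
          have h2' : ((k % 2 : Nat) : Int) = 0 := by simp [h2]
          rw [if_pos h2', Int.toNat_natCast, hset, this]
        · rw [if_neg h2] at this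
          have h2' : ¬ ((k % 2 : Nat) : Int) = 0 := by simp; omega
          rw [if_neg h2', Int.toNat_natCast, hset, this]
      rw [List.foldl_cons, List.foldl_nil, hstep, List.range_succ]
      simp
    · -- k = 0 : first iteration is empty range; replicate n 1 = [pvF 0] ++ replicate (n-1) 1
      have hk0 : k = 0 := by omega
      subst hk0
      rw [show ((1 : Nat) : Int) = 1 by rfl, PySem.List.pyRange_one_eq_nil le_rfl]
      have : n = (n - 1) + 1 := by omega
      rw [List.foldl_nil, this, List.replicate_succ]
      simp [pvF]

-- ===== VERDICT (by name: the statement is the Claim_ definition above) =====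
theorem generate_G11_spec : Claim_equal_generate_G11 := by
  intro N _
  unfold Spec_generate_G11 generate_G11 generate_G11_alt
  have hB : (PySem.List.pyRange 0 N 1).map
      (fun i => PySem.List.pyGetD [1, 2, 0, 0] (PySem.Int.mod i 4) 0)
        = (List.range N.toNat).map pvF := by
    rw [PySem.List.pyRange_one 0 N]
    simp only [Int.sub_zero, List.map_map]
    apply List.map_congr_left
    intro k _
    show PySem.List.pyGetD [1, 2, 0, 0] (PySem.Int.mod (0 + (k : Int)) 4) 0 = pvF k
    have h4 : PySem.Int.mod (k : Int) 4 = ((k % 4 : Nat) : Int) := by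
      exact_mod_cast PySem.Int.mod_natCast k 4
    rw [zero_add, h4, PySem.List.pyGetD_natCast]
    rfl
  by_cases hN : 1 ≤ N
  · have hNn : N = (N.toNat : Int) := by omega
    have h1 : 1 ≤ N.toNat := by omega
    calc (PySem.List.pyRange 1 N 1).foldl
          (fun x i =>
            if PySem.Int.mod i 2 = 0 then
              x.set i.toNat (PySem.Int.mod (PySem.List.pyGetD x (i - 1) 0 + 1) 3)
            else
              x.set i.toNat (PySem.Int.mod (PySem.List.pyGetD x (i - 1) 0 * 2) 3))
          (List.replicate N.toNat 1)
        = (PySem.List.pyRange 1 (N.toNat : Int) 1).foldl pvStep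
            (List.replicate N.toNat 1) := by rw [← hNn]; rfl
      _ = (List.range N.toNat).map pvF ++ List.replicate (N.toNat - N.toNat) 1 :=
            pvA_invariant N.toNat N.toNat h1 le_rfl
      _ = (PySem.List.pyRange 0 N 1).map
            (fun i => PySem.List.pyGetD [1, 2, 0, 0] (PySem.Int.mod i 4) 0) := by
            rw [hB]; simp
  · have h0 : N.toNat = 0 := by omega
    rw [PySem.List.pyRange_one_eq_nil (by omega), PySem.List.pyRange_one_eq_nil (by omega)]
    simp [h0]
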